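-- pv_equiv track=rewrite | github.com/CS598JBR-Team-8-Private/CS598JBR-Team-8 | MP2/task_2.py | remove_pass_only_tests
-- ===== SOURCE A (Python) =====
-- def remove_pass_only_tests(code):
--     lines = code.split('\n')
--     result_lines = []
--     i = 0
--
--     while i < len(lines):
--         line = lines[i]
--
--         if line.strip().startswith('def test_'):
--             func_lines = [line]
--             i += 1
--             indent = len(line) - len(line.lstrip())
--
--             while i < len(lines):
--                 current_line = lines[i]
--                 current_indent = len(current_line) - len(current_line.lstrip())
--
--                 if current_line.strip() and current_indent <= indent:
--                     break
--
--                 func_lines.append(current_line)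
--                 i += 1
--
--             has_real_code = False
--             for func_line in func_lines[1:]:
--                 stripped = func_line.strip()
--                 if stripped and not stripped.startswith('#') and stripped != 'pass':
--                     has_real_code = True
--                     break
--
--             if has_real_code:
--                 result_lines.extend(func_lines)
--         else:
--             result_lines.append(line)
--             i += 1
--
--     return '\n'.join(result_lines)
-- ===== SOURCE B (Python) =====
-- def remove_pass_only_tests(code):
--     out = []
--     block = None  # (header_indent, buffered_lines, has_real_code)
--     for line in code.split('\n'):
--         if block is not None:
--             indent, buf, has_real = block
--             s = line.strip()
--             if not s or len(line) - len(line.lstrip()) > indent: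
--                 buf.append(line)
--                 if s and not s.startswith('#') and s != 'pass':
--                     has_real = True
--                 block = (indent, buf, has_real)
--                 continue
--             if has_real:
--                 out.extend(buf)
--             block = None
--         if line.strip().startswith('def test_'):
--             block = (len(line) - len(line.lstrip()), [line], False)
--         else:
--             out.append(line)
--     if block is not None and block[2]:
--         out.extend(block[1])
--     return '\n'.join(out)
-- ===== Notes on version B (the rewrite author's own statement) =====
-- stated objective: alternative
-- what changed: Replaced the index-based outer loop with a nested body-consuming inner loop by a single forward pass over the lines that carries an explicit state (open test block: header indent, buffer, has_real_code flag) and flushes the buffer when the block closes or at end of input.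
import Mathlib
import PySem

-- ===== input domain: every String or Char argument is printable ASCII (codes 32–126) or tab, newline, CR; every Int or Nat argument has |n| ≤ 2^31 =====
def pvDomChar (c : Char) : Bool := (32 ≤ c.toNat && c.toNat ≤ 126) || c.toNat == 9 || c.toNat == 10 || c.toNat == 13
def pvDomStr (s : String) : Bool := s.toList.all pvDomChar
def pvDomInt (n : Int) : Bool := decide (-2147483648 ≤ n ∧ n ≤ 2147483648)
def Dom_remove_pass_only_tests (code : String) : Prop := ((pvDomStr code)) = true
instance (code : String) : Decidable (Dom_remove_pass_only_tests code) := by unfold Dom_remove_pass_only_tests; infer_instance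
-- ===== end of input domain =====

-- B replaces A's outer loop + inner body-consuming loop by a single pass carrying an
-- explicit open-block state; same result, same cost (objective: alternative).

-- ===== PORT A =====
-- indent = len(line) - len(line.lstrip())  (used verbatim by both Pythons)
def pvIndent (l : String) : Int := PySem.Str.len l - PySem.Str.len (PySem.Str.lstrip l)

-- A's inner while loop: consume body lines into func_lines, return (func_lines, rest)
def pvInnerA (ind : Int) (funcLines : List String) : List String → List String × List String
  | [] => (funcLines, [])
  | l :: ls =>
    if PySem.Str.strip l ≠ "" ∧ pvIndent l ≤ ind then (funcLines, l :: ls)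
    else pvInnerA ind (funcLines ++ [l]) ls

-- A's for-loop with break over func_lines[1:]
def pvHasRealA : List String → Bool
  | [] => false
  | l :: ls =>
    let s := PySem.Str.strip l
    if s ≠ "" ∧ ¬ (PySem.Str.startswith s "#" = true) ∧ s ≠ "pass" then true
    else pvHasRealA ls

theorem pvInnerA_snd_len (ls : List String) : ∀ (ind : Int) (acc : List String),
    (pvInnerA ind acc ls).2.length ≤ ls.length := by
  induction ls with
  | nil => intro ind acc; simp [pvInnerA]
  | cons l ls ih =>
    intro ind acc
    unfold pvInnerA
    split
    · simp
    · exact Nat.le_trans (ih ind _) (Nat.le_succ _)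

-- A's outer while loop over the line index
def pvLoopA : List String → List String
  | [] => []
  | line :: ls =>
    if PySem.Str.startswith (PySem.Str.strip line) "def test_" then
      let ind := pvIndent line
      let fr := pvInnerA ind [line] ls
      if pvHasRealA (fr.1.drop 1) then fr.1 ++ pvLoopA fr.2
      else pvLoopA fr.2
    else line :: pvLoopA ls
  termination_by ls => ls.length
  decreasing_by
  · exact Nat.lt_succ_of_le (pvInnerA_snd_len ls _ _)
  · exact Nat.lt_succ_of_le (pvInnerA_snd_len ls _ _)
  · exact Nat.lt_succ_self _

def remove_pass_only_tests (code : String) : String :=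
  PySem.Str.join "\n" (pvLoopA ((PySem.Chars.splitOn code.toList "\n".toList).map String.mk))

-- ===== PORT B =====
def pvRealLine (l : String) : Bool :=
  let s := PySem.Str.strip l
  s != "" && !(PySem.Str.startswith s "#") && s != "pass"

-- B's single pass: state = (result so far, open block: header indent × buffer × has_real)
def pvGoB : List String → List String → Option (Int × List String × Bool) → List String
  | [], res, none => res
  | [], res, some (_, buf, hr) => res ++ (if hr then buf else [])
  | l :: ls, res, some (ind, buf, hr) =>
    if PySem.Str.strip l = "" ∨ ind < pvIndent l then
      pvGoB ls res (some (ind, buf ++ [l], hr || pvRealLine l))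
    else
      let res' := res ++ (if hr then buf else [])
      if PySem.Str.startswith (PySem.Str.strip l) "def test_" then
        pvGoB ls res' (some (pvIndent l, [l], false))
      else
        pvGoB ls (res' ++ [l]) none
  | l :: ls, res, none =>
    if PySem.Str.startswith (PySem.Str.strip l) "def test_" then
      pvGoB ls res (some (pvIndent l, [l], false))
    else
      pvGoB ls (res ++ [l]) none

def remove_pass_only_tests_alt (code : String) : String :=
  PySem.Str.join "\n" (pvGoB ((PySem.Chars.splitOn code.toList "\n".toList).map String.mk) [] none)

-- ===== PRECONDITION & SPEC =====
def Spec_remove_pass_only_tests (code : String) (out : String) : Prop := out = remove_pass_only_tests_alt code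
instance (code : String) (out : String) : Decidable (Spec_remove_pass_only_tests code out) := by unfold Spec_remove_pass_only_tests; infer_instance

-- ===== CLAIM (what is proved, stated in full; the proofs are below) =====
def Claim_equal_remove_pass_only_tests : Prop := ∀ (code : String), Dom_remove_pass_only_tests code → Spec_remove_pass_only_tests code (remove_pass_only_tests code)

-- ===== LEMMAS AND PROOFS =====

-- proof-side accumulator-free form of A's inner loop
def pvTb (ind : Int) : List String → List String × List String
  | [] => ([], [])
  | l :: ls =>
    if PySem.Str.strip l = "" ∨ ind < pvIndent l then
      (l :: (pvTb ind ls).1, (pvTb ind ls).2)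
    else ([], l :: ls)

theorem pvTb_snd_len (ind : Int) (ls : List String) : (pvTb ind ls).2.length ≤ ls.length := by
  induction ls with
  | nil => simp [pvTb]
  | cons l ls ih =>
    unfold pvTb
    split
    · exact Nat.le_trans ih (Nat.le_succ _)
    · simp

theorem pvInnerA_eq (ls : List String) : ∀ (ind : Int) (acc : List String),
    pvInnerA ind acc ls = (acc ++ (pvTb ind ls).1, (pvTb ind ls).2) := by
  induction ls with
  | nil => intro ind acc; simp [pvInnerA, pvTb]
  | cons l ls ih =>
    intro ind acc
    by_cases h : PySem.Str.strip l = "" ∨ ind < pvIndent l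
    · have h' : ¬ (PySem.Str.strip l ≠ "" ∧ pvIndent l ≤ ind) := by
        rcases h with h | h
        · exact fun hc => hc.1 h
        · exact fun hc => absurd hc.2 (not_le.mpr h)
      simp only [pvInnerA, pvTb]
      rw [if_neg h', if_pos h, ih]
      simp
    · have h' : PySem.Str.strip l ≠ "" ∧ pvIndent l ≤ ind := by
        push_neg at h; exact ⟨h.1, h.2⟩
      simp only [pvInnerA, pvTb]
      rw [if_pos h', if_neg h]
      simp

theorem pvHasRealA_cons (l : String) (ls : List String) :
    pvHasRealA (l :: ls) = (pvRealLine l || pvHasRealA ls) := by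
  by_cases h1 : PySem.Str.strip l = "" <;>
    by_cases h2 : PySem.Str.startswith (PySem.Str.strip l) "#" = true <;>
      by_cases h3 : PySem.Str.strip l = "pass" <;>
        simp_all [pvHasRealA, pvRealLine]

-- closing an open block: B's pass over (body ++ rest) with state open equals
-- flushing the buffer (if real code found) and continuing on the rest with no state
theorem pvGoB_open (ls : List String) : ∀ (res buf : List String) (ind : Int) (hr : Bool),
    pvGoB ls res (some (ind, buf, hr)) =
      pvGoB (pvTb ind ls).2
        (res ++ (if hr || pvHasRealA (pvTb ind ls).1 then buf ++ (pvTb ind ls).1 else []))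
        none := by
  induction ls with
  | nil =>
    intro res buf ind hr
    simp [pvGoB, pvTb, pvHasRealA]
  | cons l ls ih =>
    intro res buf ind hr
    by_cases h : PySem.Str.strip l = "" ∨ ind < pvIndent l
    · simp only [pvGoB, if_pos h, pvTb, ih, pvHasRealA_cons, List.cons_append,
        List.append_assoc]
      congr 2
      cases hr <;> cases hrl : pvRealLine l <;> simp
    · simp only [pvGoB, if_neg h, pvTb]
      simp [pvHasRealA]

-- B's pass with no open state computes A's outer loop
theorem pvGoB_eq_loopA : ∀ (n : ℕ) (ls : List String), ls.length ≤ n → ∀ (res : List String),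
    pvGoB ls res none = res ++ pvLoopA ls := by
  intro n
  induction n with
  | zero =>
    intro ls hls res
    have : ls = [] := List.eq_nil_of_length_eq_zero (Nat.le_zero.mp hls)
    subst this; simp [pvGoB, pvLoopA]
  | succ n ih =>
    intro ls hls res
    cases ls with
    | nil => simp [pvGoB, pvLoopA]
    | cons l ls =>
      by_cases hdr : PySem.Str.startswith (PySem.Str.strip l) "def test_" = true
      · rw [show pvGoB (l :: ls) res none = pvGoB ls res (some (pvIndent l, [l], false)) by
          simp only [pvGoB]; rw [if_pos hdr]]
        rw [pvGoB_open]
        have hlen : (pvTb (pvIndent l) ls).2.length ≤ n :=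
          Nat.le_trans (pvTb_snd_len _ _) (Nat.le_of_succ_le_succ hls)
        rw [ih _ hlen]
        rw [show pvLoopA (l :: ls) =
            (if pvHasRealA ((pvInnerA (pvIndent l) [l] ls).1.drop 1) then
              (pvInnerA (pvIndent l) [l] ls).1 ++ pvLoopA (pvInnerA (pvIndent l) [l] ls).2
            else pvLoopA (pvInnerA (pvIndent l) [l] ls).2) by
          rw [pvLoopA]; rw [if_pos hdr]]
        rw [pvInnerA_eq]
        simp only [List.singleton_append, List.drop_succ_cons, List.drop_zero, Bool.false_or]
        cases hre : pvHasRealA (pvTb (pvIndent l) ls).1 <;> simp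
      · rw [show pvGoB (l :: ls) res none = pvGoB ls (res ++ [l]) none by
          simp only [pvGoB]; rw [if_neg hdr]]
        rw [ih ls (Nat.le_of_succ_le_succ hls)]
        rw [show pvLoopA (l :: ls) = l :: pvLoopA ls by rw [pvLoopA]; rw [if_neg hdr]]
        simp

-- ===== VERDICT (by name: the statement is the Claim_ definition above) =====
theorem remove_pass_only_tests_spec : Claim_equal_remove_pass_only_tests := by
  intro code _
  unfold Spec_remove_pass_only_tests remove_pass_only_tests remove_pass_only_tests_alt
  rw [pvGoB_eq_loopA ((PySem.Chars.splitOn code.toList "\n".toList).map String.mk).length _ (Nat.le_refl _) []]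
  simp
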